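-- pv_equiv track=rewrite | github.com/apache/paimon | paimon-python/pypaimon/globalindex/lumina/lumina_vector_index_options.py | _build_lumina_options
-- ===== SOURCE A (Python) =====
-- LUMINA_PREFIX = "lumina."
--
-- _ALL_OPTIONS = [
--     ("lumina.index.dimension", "128"),
--     ("lumina.index.type", "diskann"),
--     ("lumina.distance.metric", "inner_product"),
--     ("lumina.encoding.type", "pq"),
--     ("lumina.pretrain.sample_ratio", "0.2"),
--     ("lumina.diskann.build.ef_construction", "1024"),
--     ("lumina.diskann.build.neighbor_count", "64"),
--     ("lumina.diskann.build.thread_count", "32"),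
--     ("lumina.diskann.search.beam_width", "4"),
--     ("lumina.encoding.pq.m", "64"),
--     ("lumina.search.parallel_number", "5"),
-- ]
--
-- def _strip_prefix(key):
--     if key.startswith(LUMINA_PREFIX):
--         return key[len(LUMINA_PREFIX):]
--     return key
--
-- def _build_lumina_options(paimon_options):
--     """Build native Lumina options from Paimon table options.
--     1. Populate all known options with defaults
--     2. Overlay user-specified lumina.* options
--     3. Cap pq.m to dimension
--     """
--     result = {}
--
--     # 1. Populate all known options with their resolved values (user-set or default)
--     for paimon_key, default_value in _ALL_OPTIONS:
--         user_value = paimon_options.get(paimon_key)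
--         value = user_value if user_value is not None else default_value
--         result[_strip_prefix(paimon_key)] = str(value)
--
--     # 2. Overlay any extra user-specified lumina.* options not in _ALL_OPTIONS
--     known_keys = {k for k, _ in _ALL_OPTIONS}
--     for key, value in paimon_options.items():
--         if key.startswith(LUMINA_PREFIX) and key not in known_keys:
--             native_key = _strip_prefix(key)
--             result[native_key] = str(value)
--
--     # 3. Cap pq.m to dimension
--     _cap_pq_m(result)
--
--     return result
--
-- def _cap_pq_m(opts):
--     """Ensure encoding.pq.m does not exceed dimension."""
--     encoding = opts.get("encoding.type")
--     if encoding != "pq":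
--         return
--     pq_m_str = opts.get("encoding.pq.m")
--     if pq_m_str is not None:
--         pq_m = int(pq_m_str)
--         dim = int(opts.get("index.dimension", "128"))
--         if pq_m > dim:
--             opts["encoding.pq.m"] = str(dim)
-- ===== SOURCE B (Python) =====
-- LUMINA_PREFIX = "lumina."
--
-- _ALL_OPTIONS = [
--     ("lumina.index.dimension", "128"),
--     ("lumina.index.type", "diskann"),
--     ("lumina.distance.metric", "inner_product"),
--     ("lumina.encoding.type", "pq"),
--     ("lumina.pretrain.sample_ratio", "0.2"),
--     ("lumina.diskann.build.ef_construction", "1024"),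
--     ("lumina.diskann.build.neighbor_count", "64"),
--     ("lumina.diskann.build.thread_count", "32"),
--     ("lumina.diskann.search.beam_width", "4"),
--     ("lumina.encoding.pq.m", "64"),
--     ("lumina.search.parallel_number", "5"),
-- ]
--
-- def _build_lumina_options(paimon_options):
--     """Positional-slot strategy: the known options live in a fixed array of
--     slots (initialised to the defaults) indexed by a key->slot map; a single
--     pass over the user's options fills slots for known keys and collects the
--     remaining lumina.* keys as extras; the pq.m cap is applied by index
--     arithmetic on the slot array; the mapping is then assembled once from the
--     slots and the extras."""
--     n = len(LUMINA_PREFIX)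
--     index_of = {k: i for i, (k, _) in enumerate(_ALL_OPTIONS)}
--     slots = [default for _, default in _ALL_OPTIONS]
--     extras = []
--     for key, value in paimon_options.items():
--         i = index_of.get(key)
--         if i is not None:
--             slots[i] = str(value)
--         elif key.startswith(LUMINA_PREFIX):
--             extras.append((key[n:], str(value)))
--     # slot indices: 0 = index.dimension, 3 = encoding.type, 9 = encoding.pq.m
--     if slots[3] == "pq":
--         pq_m, dim = int(slots[9]), int(slots[0])
--         if pq_m > dim:
--             slots[9] = str(dim)
--     result = {k[n:]: v for (k, _), v in zip(_ALL_OPTIONS, slots)}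
--     result.update(extras)
--     return result
-- ===== Notes on version B (the rewrite author's own statement) =====
-- stated objective: alternative
-- what changed: A builds a dict of defaults by looking each known option up in the user dict, overlays extra lumina.* keys, and then mutates the dict in a _cap_pq_m pass; B uses a positional slot array indexed by a key->index map: one pass over the user's options fills slots for known keys and collects extras, the pq.m cap is applied by index arithmetic on the array, and the mapping is assembled once from slots plus extras.
import Mathlib
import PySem

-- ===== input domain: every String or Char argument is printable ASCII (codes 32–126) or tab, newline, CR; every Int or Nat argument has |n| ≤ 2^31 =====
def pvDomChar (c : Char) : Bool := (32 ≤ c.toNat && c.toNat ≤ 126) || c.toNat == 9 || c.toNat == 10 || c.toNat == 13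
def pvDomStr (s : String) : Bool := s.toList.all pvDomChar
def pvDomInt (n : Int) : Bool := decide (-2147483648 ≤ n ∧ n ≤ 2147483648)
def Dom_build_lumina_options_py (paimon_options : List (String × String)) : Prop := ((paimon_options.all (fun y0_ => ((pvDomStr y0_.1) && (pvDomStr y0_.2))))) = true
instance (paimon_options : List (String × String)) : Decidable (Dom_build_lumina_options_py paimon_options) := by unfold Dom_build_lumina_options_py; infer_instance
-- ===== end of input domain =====

-- B replaces A's dict-of-defaults + overlay + mutation pass by a positional slot array:
-- one pass over the user options fills slots (via a key->index map) and collects extras,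
-- the pq.m cap is index arithmetic on the array, and the mapping is assembled once.

-- ===== PORT A =====
def luminaPrefix : String := "lumina."

def allOptions : List (String × String) :=
  [("lumina.index.dimension", "128"),
   ("lumina.index.type", "diskann"),
   ("lumina.distance.metric", "inner_product"),
   ("lumina.encoding.type", "pq"),
   ("lumina.pretrain.sample_ratio", "0.2"),
   ("lumina.diskann.build.ef_construction", "1024"),
   ("lumina.diskann.build.neighbor_count", "64"),
   ("lumina.diskann.build.thread_count", "32"),
   ("lumina.diskann.search.beam_width", "4"),
   ("lumina.encoding.pq.m", "64"),
   ("lumina.search.parallel_number", "5")]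

def stripPrefixPy (key : String) : String :=
  if PySem.Str.startswith key luminaPrefix then
    PySem.Str.slice key (some (PySem.Str.len luminaPrefix)) none
  else key

-- _cap_pq_m: the int() conversions that raise ValueError are excluded by Pre_ (the match fallbacks)
def capPqM (opts : PySem.Dict String String) : PySem.Dict String String :=
  if opts.get? "encoding.type" ≠ some "pq" then opts
  else
    match opts.get? "encoding.pq.m" with
    | none => opts
    | some pq_m_str =>
      match PySem.Int.ofStr? pq_m_str, PySem.Int.ofStr? (opts.getD "index.dimension" "128") with
      | some pq_m, some dim => if pq_m > dim then opts.insert "encoding.pq.m" (PySem.Int.toStr dim) else opts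
      | _, _ => opts   -- int() ValueError in Python; excluded by Pre_

def build_lumina_options_py (paimon_options : List (String × String)) : List (String × String) :=
  let d := PySem.Dict.ofList paimon_options
  let result : PySem.Dict String String :=
    allOptions.foldl (fun r kv =>
      r.insert (stripPrefixPy kv.1) (match d.get? kv.1 with | some v => v | none => kv.2))
      PySem.Dict.empty
  let knownKeys : PySem.Set String := PySem.Set.ofList (allOptions.map Prod.fst)
  let result :=
    d.items.foldl (fun r kv =>
      if PySem.Str.startswith kv.1 luminaPrefix && !(PySem.Set.contains knownKeys kv.1) then
        r.insert (stripPrefixPy kv.1) kv.2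
      else r) result
  (capPqM result).items

-- ===== PORT B =====
-- index_of = {k: i for i, (k, _) in enumerate(_ALL_OPTIONS)}
def idxOf : PySem.Dict String Int :=
  (PySem.List.enumerate allOptions).foldl (fun m p => m.insert p.2.1 p.1) PySem.Dict.empty

def build_lumina_options_py_alt (paimon_options : List (String × String)) : List (String × String) :=
  let d := PySem.Dict.ofList paimon_options
  let n := PySem.Str.len luminaPrefix
  let st :=
    d.items.foldl (fun (st : List String × List (String × String)) kv =>
      match idxOf.get? kv.1 with
      | some i => (PySem.List.pySetD st.1 i kv.2, st.2)   -- i is always a valid index (0..10), so pySetD is exact here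
      | none =>
        if PySem.Str.startswith kv.1 luminaPrefix then
          (st.1, st.2 ++ [(PySem.Str.slice kv.1 (some n) none, kv.2)])
        else st)
      (allOptions.map Prod.snd, [])
  let slots := st.1
  -- slot indices: 0 = index.dimension, 3 = encoding.type, 9 = encoding.pq.m (len slots = 11, so indexing is exact)
  let slots :=
    if PySem.List.pyGetD slots 3 "" = "pq" then
      match PySem.Int.ofStr? (PySem.List.pyGetD slots 9 ""), PySem.Int.ofStr? (PySem.List.pyGetD slots 0 "") with
      | some pq_m, some dim => if pq_m > dim then PySem.List.pySetD slots 9 (PySem.Int.toStr dim) else slots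
      | _, _ => slots   -- int() ValueError in Python; excluded by Pre_
    else slots
  let result : PySem.Dict String String :=
    (allOptions.zip slots).foldl (fun r p => r.insert (PySem.Str.slice p.1.1 (some n) none) p.2)
      PySem.Dict.empty
  (result.update st.2).items

-- ===== PRECONDITION & SPEC =====
-- Pre_ excludes exactly the inputs on which _cap_pq_m's int() raises ValueError:
-- encoding.type resolves to "pq" but the resolved encoding.pq.m or index.dimension is not int-parsable.
def Pre_build_lumina_options_py (paimon_options : List (String × String)) : Prop :=
  (PySem.Dict.ofList paimon_options).getD "lumina.encoding.type" "pq" = "pq" →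
    ((PySem.Int.ofStr? ((PySem.Dict.ofList paimon_options).getD "lumina.encoding.pq.m" "64")).isSome = true ∧
     (PySem.Int.ofStr? ((PySem.Dict.ofList paimon_options).getD "lumina.index.dimension" "128")).isSome = true)
instance (paimon_options : List (String × String)) : Decidable (Pre_build_lumina_options_py paimon_options) := by
  unfold Pre_build_lumina_options_py; infer_instance

def pvWitness_build_lumina_options_py : (List (String × String)) :=
  [("lumina.encoding.pq.m", "256"), ("lumina.custom.opt", "x")]

def Spec_build_lumina_options_py (paimon_options : List (String × String)) (out : List (String × String)) : Prop := out = build_lumina_options_py_alt paimon_options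
instance (paimon_options : List (String × String)) (out : List (String × String)) : Decidable (Spec_build_lumina_options_py paimon_options out) := by unfold Spec_build_lumina_options_py; infer_instance

-- ===== CLAIM (what is proved, stated in full; the proofs are below) =====
def Claim_equal_build_lumina_options_py : Prop := ∀ (paimon_options : List (String × String)), Dom_build_lumina_options_py paimon_options → Pre_build_lumina_options_py paimon_options → Spec_build_lumina_options_py paimon_options (build_lumina_options_py paimon_options)

-- ===== LEMMAS AND PROOFS =====

-- stripping "lumina." is injective on keys that start with it
theorem strip_inj (a b : String)
    (ha : PySem.Str.startswith a luminaPrefix = true)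
    (hb : PySem.Str.startswith b luminaPrefix = true)
    (h : PySem.Str.slice a (some (PySem.Str.len luminaPrefix)) none
       = PySem.Str.slice b (some (PySem.Str.len luminaPrefix)) none) : a = b := by
  have hlen : PySem.Str.len luminaPrefix = (7:Int) := by decide
  rw [hlen] at h
  have h' : (PySem.Str.slice a (some 7) none).toList = (PySem.Str.slice b (some 7) none).toList := by rw [h]
  rw [PySem.Str.toList_slice, PySem.Str.toList_slice] at h'
  have hd : a.toList.drop 7 = b.toList.drop 7 := by
    have e : ∀ s : List Char, PySem.Chars.slice s (some 7) none = s.drop 7 := by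
      intro s; simpa using PySem.List.slice_from_natCast (xs := s) (a := 7)
    rwa [e, e] at h'
  have pa : luminaPrefix.toList.isPrefixOf a.toList = true := by
    simpa [PySem.Str.startswith, PySem.Chars.startswith] using ha
  have pb : luminaPrefix.toList.isPrefixOf b.toList = true := by
    simpa [PySem.Str.startswith, PySem.Chars.startswith] using hb
  have ta : a.toList.take 7 = luminaPrefix.toList := by
    have := (List.isPrefixOf_iff_prefix.mp pa)
    have hl : luminaPrefix.toList.length = 7 := by decide
    rw [← hl]; exact (List.prefix_iff_eq_take.mp this).symm
  have tb : b.toList.take 7 = luminaPrefix.toList := by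
    have := (List.isPrefixOf_iff_prefix.mp pb)
    have hl : luminaPrefix.toList.length = 7 := by decide
    rw [← hl]; exact (List.prefix_iff_eq_take.mp this).symm
  have : a.toList = b.toList := by
    calc a.toList = a.toList.take 7 ++ a.toList.drop 7 := (List.take_append_drop 7 a.toList).symm
    _ = b.toList.take 7 ++ b.toList.drop 7 := by rw [ta, tb, hd]
    _ = b.toList := List.take_append_drop 7 b.toList
  exact String.toList_inj.mp this

theorem stripPrefixPy_eq_slice (a : String) (h : PySem.Str.startswith a luminaPrefix = true) :
    stripPrefixPy a = PySem.Str.slice a (some (PySem.Str.len luminaPrefix)) none := by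
  simp only [stripPrefixPy, h, if_true]

theorem strip_inj' (a b : String)
    (ha : PySem.Str.startswith a luminaPrefix = true)
    (hb : PySem.Str.startswith b luminaPrefix = true)
    (h : stripPrefixPy a = stripPrefixPy b) : a = b := by
  rw [stripPrefixPy_eq_slice a ha, stripPrefixPy_eq_slice b hb] at h
  exact strip_inj a b ha hb h

-- proof-side abbreviations
def pvGuard (kv : String × String) : Bool :=
  PySem.Str.startswith kv.1 luminaPrefix &&
    !(PySem.Set.contains (PySem.Set.ofList (allOptions.map Prod.fst)) kv.1)

def pvExtras (d : PySem.Dict String String) : List (String × String) :=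
  (d.items.filter pvGuard).map (fun kv => (stripPrefixPy kv.1, kv.2))

def pvBase (d : PySem.Dict String String) (pqm : String) : List (String × String) :=
  allOptions.map (fun kv =>
    (stripPrefixPy kv.1, if kv.1 = "lumina.encoding.pq.m" then pqm else d.getD kv.1 kv.2))

theorem resolve_eq_getD (d : PySem.Dict String String) (k dflt : String) :
    (match d.get? k with | some v => v | none => dflt) = d.getD k dflt := by
  cases h : d.get? k <;> simp [PySem.Dict.getD_eq_get?_getD, h]

theorem startswith_allOptions : ∀ kv ∈ allOptions, PySem.Str.startswith kv.1 luminaPrefix = true := by decide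

theorem nodup_knownStripped : (allOptions.map (fun kv => stripPrefixPy kv.1)).Nodup := by decide

theorem guard_facts (kv : String × String) (h : pvGuard kv = true) :
    PySem.Str.startswith kv.1 luminaPrefix = true ∧ kv.1 ∉ allOptions.map Prod.fst := by
  unfold pvGuard at h
  rw [Bool.and_eq_true] at h
  refine ⟨h.1, fun hmem => ?_⟩
  have hc : PySem.Set.contains (PySem.Set.ofList (allOptions.map Prod.fst)) kv.1 = true := by
    rw [PySem.Set.contains_iff]
    exact (PySem.Set.mem_ofList _ _).mpr hmem
  rw [hc] at h
  exact absurd h.2 (by simp)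

theorem strip_notin_known (kv : String × String) (h : pvGuard kv = true) :
    stripPrefixPy kv.1 ∉ allOptions.map (fun kv => stripPrefixPy kv.1) := by
  obtain ⟨hsw, hnk⟩ := guard_facts kv h
  intro hmem
  obtain ⟨K, hK, hKeq⟩ := List.mem_map.mp hmem
  have hKsw : PySem.Str.startswith K.1 luminaPrefix = true := startswith_allOptions K hK
  have : K.1 = kv.1 := strip_inj' K.1 kv.1 hKsw hsw hKeq
  exact hnk (this ▸ List.mem_map_of_mem hK)

theorem nodup_extras_keys (d : PySem.Dict String String)
    (hkeys : (d.items.map Prod.fst).Nodup) :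
    ((d.items.filter pvGuard).map (fun kv => stripPrefixPy kv.1)).Nodup := by
  have hfkeys : ((d.items.filter pvGuard).map Prod.fst).Nodup :=
    (List.Sublist.map Prod.fst List.filter_sublist).nodup hkeys
  have : (d.items.filter pvGuard).Nodup := List.filter_sublist.nodup (List.Nodup.of_map _ hkeys)
  refine List.Nodup.map_on ?_ this
  intro x hx y hy hxy
  have hgx : pvGuard x = true := List.of_mem_filter hx
  have hgy : pvGuard y = true := List.of_mem_filter hy
  have h1 : x.1 = y.1 := strip_inj' x.1 y.1 (guard_facts x hgx).1 (guard_facts y hgy).1 hxy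
  exact List.inj_on_of_nodup_map hfkeys hx hy h1

theorem base0_eq (d : PySem.Dict String String) :
    allOptions.map (fun kv =>
        (stripPrefixPy kv.1, match d.get? kv.1 with | some v => v | none => kv.2))
      = pvBase d (d.getD "lumina.encoding.pq.m" "64") := by
  unfold pvBase
  apply List.map_congr_left
  intro kv hkv
  fin_cases hkv <;>
    first
      | (rw [resolve_eq_getD]; rw [if_neg (by decide)])
      | (rw [resolve_eq_getD]; rw [if_pos rfl])

theorem contains_base_false (d : PySem.Dict String String) (pqm : String)
    (kv : String × String) (h : pvGuard kv = true) :
    (PySem.Dict.mk (pvBase d pqm) : PySem.Dict String String).contains (stripPrefixPy kv.1) = false := by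
  rw [PySem.Dict.contains_eq_decide_mem_keys]
  have hk : (PySem.Dict.mk (pvBase d pqm) : PySem.Dict String String).keys
      = allOptions.map (fun kv => stripPrefixPy kv.1) := by
    simp [PySem.Dict.keys, pvBase, List.map_map, Function.comp]
  rw [hk]
  simp only [decide_eq_false_iff_not]
  exact strip_notin_known kv h

-- A's two loops produce pvBase (resolved pq.m) ++ pvExtras
theorem loops_A (d : PySem.Dict String String)
    (hkeys : (d.items.map Prod.fst).Nodup) :
    (d.items.foldl (fun r kv =>
      if PySem.Str.startswith kv.1 luminaPrefix &&
          !(PySem.Set.contains (PySem.Set.ofList (allOptions.map Prod.fst)) kv.1) then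
        r.insert (stripPrefixPy kv.1) kv.2
      else r)
      (allOptions.foldl (fun r kv =>
        r.insert (stripPrefixPy kv.1) (match d.get? kv.1 with | some v => v | none => kv.2))
        PySem.Dict.empty)).items
    = pvBase d (d.getD "lumina.encoding.pq.m" "64") ++ pvExtras d := by
  have h1 := PySem.Dict.items_foldl_insert_fresh allOptions (fun kv => stripPrefixPy kv.1)
      (fun kv => (match d.get? kv.1 with | some v => v | none => kv.2)) PySem.Dict.empty
      (fun a _ => by simp) nodup_knownStripped
  rw [show (PySem.Dict.empty : PySem.Dict String String).items = [] from rfl,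
    List.nil_append] at h1
  beta_reduce at h1
  have hr1 : (allOptions.foldl (fun r kv =>
      r.insert (stripPrefixPy kv.1) (match d.get? kv.1 with | some v => v | none => kv.2))
      PySem.Dict.empty)
      = PySem.Dict.mk (pvBase d (d.getD "lumina.encoding.pq.m" "64")) := by
    apply PySem.Dict.ext
    rw [h1]
    exact base0_eq d
  rw [hr1, ← List.foldl_filter]
  have h2 := PySem.Dict.items_foldl_insert_fresh
      (d.items.filter pvGuard) (fun kv => stripPrefixPy kv.1) Prod.snd
      (PySem.Dict.mk (pvBase d (d.getD "lumina.encoding.pq.m" "64")))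
      (fun a ha => contains_base_false d _ a (List.of_mem_filter ha))
      (nodup_extras_keys d hkeys)
  exact h2

theorem pvBase_eq_lit (d : PySem.Dict String String) (pqm : String) :
    pvBase d pqm =
  [("index.dimension", d.getD "lumina.index.dimension" "128"),
   ("index.type", d.getD "lumina.index.type" "diskann"),
   ("distance.metric", d.getD "lumina.distance.metric" "inner_product"),
   ("encoding.type", d.getD "lumina.encoding.type" "pq"),
   ("pretrain.sample_ratio", d.getD "lumina.pretrain.sample_ratio" "0.2"),
   ("diskann.build.ef_construction", d.getD "lumina.diskann.build.ef_construction" "1024"),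
   ("diskann.build.neighbor_count", d.getD "lumina.diskann.build.neighbor_count" "64"),
   ("diskann.build.thread_count", d.getD "lumina.diskann.build.thread_count" "32"),
   ("diskann.search.beam_width", d.getD "lumina.diskann.search.beam_width" "4"),
   ("encoding.pq.m", pqm),
   ("search.parallel_number", d.getD "lumina.search.parallel_number" "5")] := by
  unfold pvBase
  simp only [allOptions, List.map, List.cons.injEq, Prod.mk.injEq, and_true]
  exact ⟨⟨by decide, by rw [if_neg (by decide)]⟩,
    ⟨by decide, by rw [if_neg (by decide)]⟩,
    ⟨by decide, by rw [if_neg (by decide)]⟩,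
    ⟨by decide, by rw [if_neg (by decide)]⟩,
    ⟨by decide, by rw [if_neg (by decide)]⟩,
    ⟨by decide, by rw [if_neg (by decide)]⟩,
    ⟨by decide, by rw [if_neg (by decide)]⟩,
    ⟨by decide, by rw [if_neg (by decide)]⟩,
    ⟨by decide, by rw [if_neg (by decide)]⟩,
    ⟨by decide, by simp⟩,
    ⟨by decide, by rw [if_neg (by decide)]⟩⟩

theorem get?_R_enc (d : PySem.Dict String String) (pqm : String) :
    (PySem.Dict.mk (pvBase d pqm ++ pvExtras d) : PySem.Dict String String).get? "encoding.type"
      = some (d.getD "lumina.encoding.type" "pq") := by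
  rw [pvBase_eq_lit]
  simp [PySem.Dict.get?_mk_cons]

theorem get?_R_pqm (d : PySem.Dict String String) (pqm : String) :
    (PySem.Dict.mk (pvBase d pqm ++ pvExtras d) : PySem.Dict String String).get? "encoding.pq.m"
      = some pqm := by
  rw [pvBase_eq_lit]
  simp [PySem.Dict.get?_mk_cons]

theorem getD_R_dim (d : PySem.Dict String String) (pqm : String) :
    (PySem.Dict.mk (pvBase d pqm ++ pvExtras d) : PySem.Dict String String).getD "index.dimension" "128"
      = d.getD "lumina.index.dimension" "128" := by
  rw [pvBase_eq_lit]
  simp [PySem.Dict.getD_eq_get?_getD, PySem.Dict.get?_mk_cons]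

theorem insert_R_pqm (d : PySem.Dict String String) (pqm w : String) :
    (PySem.Dict.mk (pvBase d pqm ++ pvExtras d) : PySem.Dict String String).insert "encoding.pq.m" w
      = PySem.Dict.mk (pvBase d w ++ pvExtras d) := by
  have hc : (PySem.Dict.mk (pvBase d pqm ++ pvExtras d) : PySem.Dict String String).contains "encoding.pq.m" = true := by
    rw [PySem.Dict.contains_eq_isSome_get?, get?_R_pqm]
    rfl
  apply PySem.Dict.ext
  rw [PySem.Dict.items_insert_of_contains _ _ hc]
  show List.map _ (pvBase d pqm ++ pvExtras d) = pvBase d w ++ pvExtras d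
  rw [List.map_append]
  refine congrArg₂ (· ++ ·) ?_ ?_
  · rw [pvBase_eq_lit, pvBase_eq_lit]
    simp
  · refine (List.map_congr_left ?_).trans (List.map_id _)
    intro p hp
    obtain ⟨kv, hkv, rfl⟩ := List.mem_map.mp hp
    have hne : stripPrefixPy kv.1 ≠ "encoding.pq.m" := by
      intro he
      apply strip_notin_known kv (List.of_mem_filter hkv)
      rw [he]
      decide
    simp [hne]

-- ========== B-side lemmas ==========

def pvApply (s : List String) (kv : String × String) : List String :=
  match idxOf.get? kv.1 with
  | some i => PySem.List.pySetD s i kv.2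
  | none => s

theorem idx_keys : idxOf.keys = allOptions.map Prod.fst := by decide

theorem idx_get_known : ∀ j : Fin 11,
    idxOf.get? ((allOptions.map Prod.fst).getD (j : Nat) "") = some ((j : Nat) : Int) := by decide

-- the single pass over the user's options splits into a slot fold and the extras list
theorem foldB_split (l : List (String × String)) (s : List String) (e : List (String × String)) :
    l.foldl (fun (st : List String × List (String × String)) kv =>
      match idxOf.get? kv.1 with
      | some i => (PySem.List.pySetD st.1 i kv.2, st.2)
      | none =>
        if PySem.Str.startswith kv.1 luminaPrefix then
          (st.1, st.2 ++ [(PySem.Str.slice kv.1 (some (PySem.Str.len luminaPrefix)) none, kv.2)])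
        else st) (s, e)
    = (l.foldl pvApply s,
       e ++ (l.filter pvGuard).map (fun kv =>
         (PySem.Str.slice kv.1 (some (PySem.Str.len luminaPrefix)) none, kv.2))) := by
  induction l generalizing s e with
  | nil => simp
  | cons kv rest ih =>
    rw [List.foldl_cons, List.foldl_cons, List.filter_cons]
    cases h : idxOf.get? kv.1 with
    | some i =>
      have hmem : kv.1 ∈ allOptions.map Prod.fst := by
        rw [← idx_keys, ← PySem.Dict.contains_iff_mem_keys]
        rw [PySem.Dict.contains_eq_isSome_get?, h]
        rfl
      have hc : PySem.Set.contains (PySem.Set.ofList (allOptions.map Prod.fst)) kv.1 = true := by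
        rw [PySem.Set.contains_iff]
        exact (PySem.Set.mem_ofList _ _).mpr hmem
      have hg : pvGuard kv = false := by
        unfold pvGuard
        rw [hc]
        simp
      have hap : pvApply s kv = PySem.List.pySetD s i kv.2 := by
        unfold pvApply
        rw [h]
      simp only [hg, Bool.false_eq_true, if_false]
      rw [← hap]
      exact ih _ _
    | none =>
      have hnmem : kv.1 ∉ allOptions.map Prod.fst := by
        rw [← idx_keys]
        exact (PySem.Dict.get?_eq_none_iff_not_mem_keys _ _).mp h
      have hc : PySem.Set.contains (PySem.Set.ofList (allOptions.map Prod.fst)) kv.1 = false := by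
        rw [← Bool.not_eq_true, PySem.Set.contains_iff, PySem.Set.mem_ofList]
        exact hnmem
      have hg : pvGuard kv = PySem.Str.startswith kv.1 luminaPrefix := by
        unfold pvGuard
        rw [hc]
        simp
      have hap : pvApply s kv = s := by
        unfold pvApply
        rw [h]
      by_cases hsw : PySem.Str.startswith kv.1 luminaPrefix = true
      · simp only [hg, hsw, if_true]
        rw [ih _ _, hap]
        simp
      · rw [Bool.not_eq_true] at hsw
        simp only [hg, hsw, Bool.false_eq_true, if_false]
        rw [hap]
        exact ih _ _

theorem length_foldl_pvApply (l : List (String × String)) (s : List String) :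
    (l.foldl pvApply s).length = s.length := by
  induction l generalizing s with
  | nil => rfl
  | cons kv rest ih =>
    rw [List.foldl_cons, ih]
    unfold pvApply
    cases idxOf.get? kv.1 with
    | some i => exact PySem.List.length_pySetD _ _ _
    | none => rfl

theorem keysList_nodup : (allOptions.map Prod.fst).Nodup := by decide

-- what the slot fold leaves in slot j: the first (= only) user value for the j-th key, else the start value
theorem foldl_pvApply_getD (l : List (String × String)) (hnd : (l.map Prod.fst).Nodup)
    (s : List String) (hs : s.length = 11) (j : Nat) (hj : j < 11) :
    (l.foldl pvApply s).getD j "" =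
      match l.find? (fun kv => kv.1 == (allOptions.map Prod.fst).getD j "") with
      | some kv => kv.2
      | none => s.getD j "" := by
  induction l generalizing s with
  | nil => rfl
  | cons kv rest ih =>
    rw [List.map_cons, List.nodup_cons] at hnd
    rw [List.foldl_cons, List.find?_cons]
    have hkj : (allOptions.map Prod.fst).getD j "" = (allOptions.map Prod.fst)[j] := by
      rw [List.getD_eq_getElem?_getD, List.getElem?_eq_getElem (by simpa using hj)]
      rfl
    cases h : idxOf.get? kv.1 with
    | none =>
      have hnmem : kv.1 ∉ allOptions.map Prod.fst := by
        rw [← idx_keys]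
        exact (PySem.Dict.get?_eq_none_iff_not_mem_keys _ _).mp h
      have hne : (kv.1 == (allOptions.map Prod.fst).getD j "") = false := by
        rw [beq_eq_false_iff_ne]
        intro he
        exact hnmem (he ▸ (hkj ▸ List.getElem_mem _))
      rw [hne]
      have hap : pvApply s kv = s := by unfold pvApply; rw [h]
      rw [hap, ih hnd.2 s hs]
    | some i =>
      have hmem : kv.1 ∈ allOptions.map Prod.fst := by
        rw [← idx_keys, ← PySem.Dict.contains_iff_mem_keys]
        rw [PySem.Dict.contains_eq_isSome_get?, h]
        rfl
      obtain ⟨j0, hj0, hv⟩ := List.mem_iff_getElem.mp hmem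
      have hj0' : j0 < 11 := by simpa using hj0
      have hknown := idx_get_known ⟨j0, hj0'⟩
      have hg0 : (allOptions.map Prod.fst).getD j0 "" = kv.1 := by
        rw [List.getD_eq_getElem?_getD, List.getElem?_eq_getElem hj0]
        exact hv
      rw [hg0] at hknown
      rw [h] at hknown
      have hi : i = (j0 : Int) := by simpa using hknown
      have hap : pvApply s kv = s.set j0 kv.2 := by
        unfold pvApply
        rw [h, hi]
        show PySem.List.pySetD s ((j0 : Nat) : Int) kv.2 = s.set j0 kv.2
        rw [PySem.List.pySetD_natCast]
      rw [hap, ih hnd.2 _ (by rw [List.length_set]; exact hs)]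
      by_cases hjj : j0 = j
      · subst hjj
        have hhd : (kv.1 == (allOptions.map Prod.fst).getD j0 "") = true := by
          rw [hg0]; exact beq_self_eq_true _
        rw [hhd]
        have hrest : rest.find? (fun kv' => kv'.1 == (allOptions.map Prod.fst).getD j0 "") = none := by
          rw [List.find?_eq_none]
          intro x hx
          rw [hg0]
          simp only [beq_eq_false_iff_ne, ne_eq, Bool.not_eq_true]
          intro he
          exact hnd.1 (he ▸ List.mem_map_of_mem hx)
        rw [hrest]
        have hjs : j0 < s.length := by omega
        simp [List.getD_eq_getElem?_getD, hjs]
      · have hhd : (kv.1 == (allOptions.map Prod.fst).getD j "") = false := by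
          rw [beq_eq_false_iff_ne]
          intro he
          apply hjj
          exact keysList_nodup.getElem_inj_iff.mp (hv.trans (he.trans hkj))
        rw [hhd]
        cases rest.find? (fun kv' => kv'.1 == (allOptions.map Prod.fst).getD j "") with
        | some kv' => rfl
        | none =>
          simp only []
          rw [List.getD_eq_getElem?_getD, List.getD_eq_getElem?_getD,
            List.getElem?_set_ne (by omega)]

def pvVals (d : PySem.Dict String String) : List String :=
  allOptions.map (fun kv => d.getD kv.1 kv.2)

theorem slots_eq (d : PySem.Dict String String)
    (hnd : (d.items.map Prod.fst).Nodup) :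
    d.items.foldl pvApply (allOptions.map Prod.snd) = pvVals d := by
  have h11 : allOptions.length = 11 := by decide
  have hlen : (d.items.foldl pvApply (allOptions.map Prod.snd)).length = 11 := by
    rw [length_foldl_pvApply]; decide
  have hlen2 : (pvVals d).length = 11 := by
    unfold pvVals; rw [List.length_map, h11]
  apply List.ext_getElem (by rw [hlen, hlen2])
  intro j hj1 hj2
  have hj : j < 11 := by rwa [hlen] at hj1
  have hjo : j < allOptions.length := by omega
  rw [← List.getD_eq_getElem _ "" hj1, ← List.getD_eq_getElem _ "" hj2]
  rw [foldl_pvApply_getD d.items hnd _ (by decide) j hj]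
  have hk : (allOptions.map Prod.fst).getD j "" = (allOptions[j]'hjo).1 := by
    rw [List.getD_eq_getElem?_getD, List.getElem?_map, List.getElem?_eq_getElem hjo]
    rfl
  have hv2 : (allOptions.map Prod.snd).getD j "" = (allOptions[j]'hjo).2 := by
    rw [List.getD_eq_getElem?_getD, List.getElem?_map, List.getElem?_eq_getElem hjo]
    rfl
  have hr : (pvVals d).getD j "" = d.getD (allOptions[j]'hjo).1 (allOptions[j]'hjo).2 := by
    unfold pvVals
    rw [List.getD_eq_getElem?_getD, List.getElem?_map, List.getElem?_eq_getElem hjo]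
    rfl
  have hgd : d.getD ((allOptions.map Prod.fst).getD j "") ((allOptions.map Prod.snd).getD j "")
      = match d.items.find? (fun kv => kv.1 == (allOptions.map Prod.fst).getD j "") with
        | some kv => kv.2
        | none => (allOptions.map Prod.snd).getD j "" := by
    rw [PySem.Dict.getD_eq_get?_getD,
      show d.get? ((allOptions.map Prod.fst).getD j "")
        = (d.items.find? (fun kv => kv.1 == (allOptions.map Prod.fst).getD j "")).map Prod.snd from rfl]
    cases d.items.find? (fun kv => kv.1 == (allOptions.map Prod.fst).getD j "") <;> rfl
  rw [← hgd, hk, hv2, hr]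

-- the slot list written out (slot 9 = encoding.pq.m held abstract)
def pvLit (d : PySem.Dict String String) (pqm : String) : List String :=
  [d.getD "lumina.index.dimension" "128",
   d.getD "lumina.index.type" "diskann",
   d.getD "lumina.distance.metric" "inner_product",
   d.getD "lumina.encoding.type" "pq",
   d.getD "lumina.pretrain.sample_ratio" "0.2",
   d.getD "lumina.diskann.build.ef_construction" "1024",
   d.getD "lumina.diskann.build.neighbor_count" "64",
   d.getD "lumina.diskann.build.thread_count" "32",
   d.getD "lumina.diskann.search.beam_width" "4",
   pqm,
   d.getD "lumina.search.parallel_number" "5"]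

theorem pvVals_eq_lit (d : PySem.Dict String String) :
    pvVals d = pvLit d (d.getD "lumina.encoding.pq.m" "64") := rfl

theorem pyGetD_lit_3 (d : PySem.Dict String String) (q : String) :
    PySem.List.pyGetD (pvLit d q) 3 "" = d.getD "lumina.encoding.type" "pq" := rfl

theorem pyGetD_lit_9 (d : PySem.Dict String String) (q : String) :
    PySem.List.pyGetD (pvLit d q) 9 "" = q := rfl

theorem pyGetD_lit_0 (d : PySem.Dict String String) (q : String) :
    PySem.List.pyGetD (pvLit d q) 0 "" = d.getD "lumina.index.dimension" "128" := rfl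

theorem pySetD_lit_9 (d : PySem.Dict String String) (q w : String) :
    PySem.List.pySetD (pvLit d q) 9 w = pvLit d w := rfl

-- assembling the result dict from the slots and the extras gives pvBase ++ pvExtras
theorem assemble_eq (d : PySem.Dict String String)
    (hkeys : (d.items.map Prod.fst).Nodup) (q : String) :
    ((((allOptions.zip (pvLit d q)).foldl
        (fun r p => r.insert (PySem.Str.slice p.1.1 (some (PySem.Str.len luminaPrefix)) none) p.2)
        PySem.Dict.empty) : PySem.Dict String String).update
      ((d.items.filter pvGuard).map (fun kv =>
        (PySem.Str.slice kv.1 (some (PySem.Str.len luminaPrefix)) none, kv.2)))).items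
    = pvBase d q ++ pvExtras d := by
  have hzip : allOptions.zip (pvLit d q) =
    [(("lumina.index.dimension", "128"), d.getD "lumina.index.dimension" "128"),
     (("lumina.index.type", "diskann"), d.getD "lumina.index.type" "diskann"),
     (("lumina.distance.metric", "inner_product"), d.getD "lumina.distance.metric" "inner_product"),
     (("lumina.encoding.type", "pq"), d.getD "lumina.encoding.type" "pq"),
     (("lumina.pretrain.sample_ratio", "0.2"), d.getD "lumina.pretrain.sample_ratio" "0.2"),
     (("lumina.diskann.build.ef_construction", "1024"), d.getD "lumina.diskann.build.ef_construction" "1024"),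
     (("lumina.diskann.build.neighbor_count", "64"), d.getD "lumina.diskann.build.neighbor_count" "64"),
     (("lumina.diskann.build.thread_count", "32"), d.getD "lumina.diskann.build.thread_count" "32"),
     (("lumina.diskann.search.beam_width", "4"), d.getD "lumina.diskann.search.beam_width" "4"),
     (("lumina.encoding.pq.m", "64"), q),
     (("lumina.search.parallel_number", "5"), d.getD "lumina.search.parallel_number" "5")] := rfl
  have hmapk : (allOptions.zip (pvLit d q)).map
      (fun p => PySem.Str.slice p.1.1 (some (PySem.Str.len luminaPrefix)) none)
      = allOptions.map (fun kv => stripPrefixPy kv.1) := by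
    rw [hzip]
    simp only [List.map_cons, List.map_nil]
    decide
  have hmap2 : (allOptions.zip (pvLit d q)).map
      (fun p => (PySem.Str.slice p.1.1 (some (PySem.Str.len luminaPrefix)) none, p.2))
      = pvBase d q := by
    rw [hzip, pvBase_eq_lit]
    simp only [List.map_cons, List.map_nil, List.cons.injEq, Prod.mk.injEq, and_true]
    decide
  have hbase : ((allOptions.zip (pvLit d q)).foldl
      (fun r p => r.insert (PySem.Str.slice p.1.1 (some (PySem.Str.len luminaPrefix)) none) p.2)
      PySem.Dict.empty : PySem.Dict String String)
      = PySem.Dict.mk (pvBase d q) := by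
    apply PySem.Dict.ext
    have h1 := PySem.Dict.items_foldl_insert_fresh (allOptions.zip (pvLit d q))
        (fun p => PySem.Str.slice p.1.1 (some (PySem.Str.len luminaPrefix)) none)
        Prod.snd PySem.Dict.empty
        (fun a _ => by simp)
        (by rw [hmapk]; exact nodup_knownStripped)
    rw [show (PySem.Dict.empty : PySem.Dict String String).items = [] from rfl,
      List.nil_append] at h1
    rw [h1, ← hmap2]
  have hextras : (d.items.filter pvGuard).map (fun kv =>
      (PySem.Str.slice kv.1 (some (PySem.Str.len luminaPrefix)) none, kv.2)) = pvExtras d := by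
    unfold pvExtras
    apply List.map_congr_left
    intro kv hkv
    rw [stripPrefixPy_eq_slice kv.1 (guard_facts kv (List.of_mem_filter hkv)).1]
  rw [hbase, hextras]
  show ((pvExtras d).foldl (fun r kv => r.insert kv.1 kv.2) (PySem.Dict.mk (pvBase d q))).items
    = pvBase d q ++ pvExtras d
  have h2 := PySem.Dict.items_foldl_insert_fresh (pvExtras d) Prod.fst Prod.snd
      (PySem.Dict.mk (pvBase d q))
      (fun a ha => by
        obtain ⟨kv, hkv, rfl⟩ := List.mem_map.mp ha
        exact contains_base_false d q kv (List.of_mem_filter hkv))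
      (by
        have hx : (pvExtras d).map Prod.fst
            = (d.items.filter pvGuard).map (fun kv => stripPrefixPy kv.1) := by
          simp [pvExtras, List.map_map, Function.comp]
        rw [hx]
        exact nodup_extras_keys d hkeys)
  simpa using h2

-- B's port computes pvBase (capped pq.m) ++ pvExtras
theorem alt_eq (po : List (String × String)) :
    build_lumina_options_py_alt po =
      pvBase (PySem.Dict.ofList po)
        (if (PySem.Dict.ofList po).getD "lumina.encoding.type" "pq" = "pq" then
          match PySem.Int.ofStr? ((PySem.Dict.ofList po).getD "lumina.encoding.pq.m" "64"),
              PySem.Int.ofStr? ((PySem.Dict.ofList po).getD "lumina.index.dimension" "128") with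
          | some pq_m, some dim =>
            if pq_m > dim then PySem.Int.toStr dim
            else (PySem.Dict.ofList po).getD "lumina.encoding.pq.m" "64"
          | _, _ => (PySem.Dict.ofList po).getD "lumina.encoding.pq.m" "64"
         else (PySem.Dict.ofList po).getD "lumina.encoding.pq.m" "64")
      ++ pvExtras (PySem.Dict.ofList po) := by
  have hkeys : ((PySem.Dict.ofList po).items.map Prod.fst).Nodup := by
    simpa [PySem.Dict.keys] using PySem.Dict.nodup_keys_ofList po
  show ((((allOptions.zip _).foldl _ PySem.Dict.empty : PySem.Dict String String)).update _).items = _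
  rw [foldB_split]
  simp only [List.nil_append]
  rw [slots_eq _ hkeys, pvVals_eq_lit]
  rw [pyGetD_lit_3, pyGetD_lit_9, pyGetD_lit_0]
  set d := PySem.Dict.ofList po with hd
  by_cases henc : d.getD "lumina.encoding.type" "pq" = "pq"
  · rw [if_pos henc, if_pos henc]
    cases hm : PySem.Int.ofStr? (d.getD "lumina.encoding.pq.m" "64") with
    | none =>
      cases hdim : PySem.Int.ofStr? (d.getD "lumina.index.dimension" "128") <;>
        (simp only []; exact assemble_eq d hkeys _)
    | some m =>
      cases hdim : PySem.Int.ofStr? (d.getD "lumina.index.dimension" "128") with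
      | none => exact assemble_eq d hkeys _
      | some dim =>
        simp only []
        by_cases hgt : m > dim
        · rw [if_pos hgt, if_pos hgt, pySetD_lit_9]
          exact assemble_eq d hkeys _
        · rw [if_neg hgt, if_neg hgt]
          exact assemble_eq d hkeys _
  · rw [if_neg henc, if_neg henc]
    exact assemble_eq d hkeys _

-- ===== VERDICT (by name: the statement is the Claim_ definition above) =====
theorem build_lumina_options_py_spec : Claim_equal_build_lumina_options_py := by
  intro po hdom hpre
  unfold Spec_build_lumina_options_py
  have hkeys : ((PySem.Dict.ofList po).items.map Prod.fst).Nodup := by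
    simpa [PySem.Dict.keys] using PySem.Dict.nodup_keys_ofList po
  have hA : build_lumina_options_py po
      = (capPqM (PySem.Dict.mk (pvBase (PySem.Dict.ofList po)
          ((PySem.Dict.ofList po).getD "lumina.encoding.pq.m" "64")
          ++ pvExtras (PySem.Dict.ofList po)))).items :=
    congrArg (fun D => (capPqM D).items) (PySem.Dict.ext (loops_A (PySem.Dict.ofList po) hkeys))
  rw [hA, alt_eq po]
  set d := PySem.Dict.ofList po with hd
  unfold capPqM
  rw [get?_R_enc, get?_R_pqm, getD_R_dim]
  by_cases henc : d.getD "lumina.encoding.type" "pq" = "pq"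
  · obtain ⟨h1, h2⟩ := hpre henc
    obtain ⟨m, hm⟩ := Option.isSome_iff_exists.mp h1
    obtain ⟨dim, hdim⟩ := Option.isSome_iff_exists.mp h2
    rw [← hd] at hm hdim
    rw [if_neg (by simp [henc]), henc, hm, hdim]
    by_cases hgt : m > dim
    · simp [hgt, hm, insert_R_pqm]
    · simp [hgt, hm]
  · rw [if_pos (by simp [henc])]
    simp [henc]
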